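-- pv_equiv track=rewrite | github.com/kimsa1119/seoul-vegabonds | app.py | _get_first_value
-- ===== SOURCE A (Python) =====
-- from typing import Any, Optional
-- from typing import List, Dict, Any, Tuple
--
-- def _get_first_value(row: Dict[str, Any], keys: List[str]) -> str:
--     for k in keys:
--         if k in row and row[k]:
--             return str(row[k]).strip()
--         lk = k.lower()
--         for key in row.keys():
--             if key.lower() == lk and row[key]:
--                 return str(row[key]).strip()
--     return ""
-- ===== SOURCE B (Python) =====
-- def _get_first_value(row, keys):
--     # Row-major single pass: rank every truthy row entry by (keys index, exact-before-
--     # case-insensitive, row position) and keep the best-ranked candidate, instead of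
--     # scanning the whole row again for each key.
--     kpos, lpos = {}, {}
--     for i, k in enumerate(keys):
--         kpos.setdefault(k, i)
--         lpos.setdefault(k.lower(), i)
--     best = None  # ((keys_index, 0 exact / 1 case-insensitive, row_position), value)
--     for pos, (key, val) in enumerate(row.items()):
--         if not val:
--             continue
--         i = kpos.get(key)
--         if i is not None and (best is None or (i, 0, pos) < best[0]):
--             best = ((i, 0, pos), val)
--         j = lpos.get(key.lower())
--         if j is not None and (best is None or (j, 1, pos) < best[0]):
--             best = ((j, 1, pos), val)
--     return str(best[1]).strip() if best is not None else ""
-- ===== Notes on version B (the rewrite author's own statement) =====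
-- stated objective: alternative
-- what changed: Loop interchange: instead of A's key-major nested loops (for each key, rescan the whole row case-insensitively), B makes one row-major pass that ranks every truthy row entry by the tuple (keys index, exact-before-case-insensitive, row position) and returns the minimum-ranked candidate's value, after one indexing pass over keys.
import Mathlib
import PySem

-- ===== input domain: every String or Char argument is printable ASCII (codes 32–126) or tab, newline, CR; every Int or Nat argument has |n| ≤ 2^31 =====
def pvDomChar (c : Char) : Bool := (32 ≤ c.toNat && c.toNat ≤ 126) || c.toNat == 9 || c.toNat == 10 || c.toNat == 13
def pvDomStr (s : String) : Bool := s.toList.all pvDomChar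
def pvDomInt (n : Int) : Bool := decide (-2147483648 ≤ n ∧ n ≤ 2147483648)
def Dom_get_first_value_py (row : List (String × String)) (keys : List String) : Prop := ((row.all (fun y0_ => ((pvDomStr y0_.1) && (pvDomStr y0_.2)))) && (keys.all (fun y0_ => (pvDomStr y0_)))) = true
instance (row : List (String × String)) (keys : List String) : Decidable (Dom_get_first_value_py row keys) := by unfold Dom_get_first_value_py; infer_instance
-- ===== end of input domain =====

-- B interchanges the loops: one row-major pass ranks every truthy row entry by
-- (keys index, exact-before-case-insensitive, row position) and the best-ranked
-- candidate wins, instead of A's per-key rescans of the row.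

-- Python truthiness of a str: nonempty
def pvTruthy (s : String) : Bool := !(s == "")

-- ===== PORT A =====
-- outer loop 'for k in keys'; the inner loop 'for key in row.keys(): if key.lower()==lk and row[key]' is the early-return scan List.find?
def pvLoopA (d : PySem.Dict String String) : List String → String
  | [] => ""
  | k :: rest =>
    if d.contains k && pvTruthy (d.getD k "") then PySem.Str.strip (d.getD k "")
    else
      match d.keys.find? (fun key => (PySem.Str.lower key == PySem.Str.lower k) && pvTruthy (d.getD key "")) with
      | some key => PySem.Str.strip (d.getD key "")
      | none => pvLoopA d rest

def get_first_value_py (row : List (String × String)) (keys : List String) : String :=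
  pvLoopA (PySem.Dict.ofList row) keys

-- ===== PORT B =====
-- Python's tuple comparison (i, f, p) < (i', f', p') on ints, lexicographic
def pvLt3 (a b : Int × Int × Int) : Bool :=
  a.1 < b.1 || (a.1 == b.1 && (a.2.1 < b.2.1 || (a.2.1 == b.2.1 && a.2.2 < b.2.2)))

-- Source B's conditional update 'if best is None or cand < best[0]: best = (cand, val)'
def pvStep (best : Option ((Int × Int × Int) × String)) (c : (Int × Int × Int) × String) :
    Option ((Int × Int × Int) × String) :=
  match best with
  | none => some c
  | some b => if pvLt3 c.1 b.1 then some c else best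

-- first loop of Source B: kpos.setdefault(k, i); lpos.setdefault(k.lower(), i) over enumerate(keys)
def pvBuildPos : List (Int × String) → PySem.Dict String Int × PySem.Dict String Int →
    PySem.Dict String Int × PySem.Dict String Int
  | [], st => st
  | (i, k) :: rest, (kp, lp) =>
    pvBuildPos rest (kp.setdefault k i, lp.setdefault (PySem.Str.lower k) i)

-- second loop of Source B, over enumerate(row.items()): skip falsy values, then the two
-- candidate updates (exact key, then lowercased key)
def pvScanB (kp lp : PySem.Dict String Int) :
    List (Int × (String × String)) → Option ((Int × Int × Int) × String) →
    Option ((Int × Int × Int) × String)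
  | [], best => best
  | (pos, (key, val)) :: rest, best =>
    if !(pvTruthy val) then pvScanB kp lp rest best
    else
      let best1 := match kp.get? key with
        | some i => pvStep best ((i, 0, pos), val)
        | none => best
      let best2 := match lp.get? (PySem.Str.lower key) with
        | some j => pvStep best1 ((j, 1, pos), val)
        | none => best1
      pvScanB kp lp rest best2

def get_first_value_py_alt (row : List (String × String)) (keys : List String) : String :=
  let d := PySem.Dict.ofList row
  let st := pvBuildPos (PySem.List.enumerate keys) (PySem.Dict.empty, PySem.Dict.empty)
  match pvScanB st.1 st.2 (PySem.List.enumerate d.items) none with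
  | some c => PySem.Str.strip c.2
  | none => ""

-- ===== PRECONDITION & SPEC =====
def Spec_get_first_value_py (row : List (String × String)) (keys : List String) (out : String) : Prop := out = get_first_value_py_alt row keys
instance (row : List (String × String)) (keys : List String) (out : String) : Decidable (Spec_get_first_value_py row keys out) := by unfold Spec_get_first_value_py; infer_instance

-- ===== CLAIM (what is proved, stated in full; the proofs are below) =====
def Claim_equal_get_first_value_py : Prop := ∀ (row : List (String × String)) (keys : List String), Dom_get_first_value_py row keys → Spec_get_first_value_py row keys (get_first_value_py row keys)

-- ===== LEMMAS AND PROOFS =====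

-- A's loop rewritten over the items list L (valid once row keys are unique)
def pvLoopA' (L : List (String × String)) : List String → String
  | [] => ""
  | k :: rest =>
    if (match L.find? (fun p => p.1 == k) with
        | some p => pvTruthy p.2
        | none => false) then
      PySem.Str.strip (((L.find? (fun p => p.1 == k)).map Prod.snd).getD "")
    else
      match L.find? (fun p => (PySem.Str.lower p.1 == PySem.Str.lower k) && pvTruthy p.2) with
      | some p => PySem.Str.strip p.2
      | none => pvLoopA' L rest

-- index of the first key (from start n) equal to / lowercasing to the probe
def pvIdx (keys : List String) (n : Int) (key : String) : Option Int :=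
  ((PySem.List.enumerate keys n).find? (fun e => e.2 == key)).map (·.1)
def pvIdxL (keys : List String) (n : Int) (s : String) : Option Int :=
  ((PySem.List.enumerate keys n).find? (fun e => PySem.Str.lower e.2 == s)).map (·.1)

-- the candidate list B's scan folds over
def pvCands (keys : List String) (n : Int) :
    List (Int × (String × String)) → List ((Int × Int × Int) × String)
  | [] => []
  | (pos, (key, val)) :: rest =>
    (if pvTruthy val then
      (match pvIdx keys n key with | some i => [((i, (0:Int), pos), val)] | none => []) ++
      (match pvIdxL keys n (PySem.Str.lower key) with | some j => [((j, (1:Int), pos), val)] | none => [])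
    else []) ++ pvCands keys n rest

def pvCandsD (kp lp : PySem.Dict String Int) :
    List (Int × (String × String)) → List ((Int × Int × Int) × String)
  | [] => []
  | (pos, (key, val)) :: rest =>
    (if pvTruthy val then
      (match kp.get? key with | some i => [((i, (0:Int), pos), val)] | none => []) ++
      (match lp.get? (PySem.Str.lower key) with | some j => [((j, (1:Int), pos), val)] | none => [])
    else []) ++ pvCandsD kp lp rest

def pvOut : Option ((Int × Int × Int) × String) → String
  | none => ""
  | some c => PySem.Str.strip c.2

theorem pvSetdefault_eq {ν : Type} (d : PySem.Dict String ν) (k : String) (v : ν) :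
    d.setdefault k v = if d.contains k then d else d.insert k v := by
  unfold PySem.Dict.setdefault
  split
  · rfl
  · next h =>
    apply PySem.Dict.ext
    simp [PySem.Dict.items_insert, h]

theorem pvBuildPos_fst (l : List (Int × String)) (kp lp : PySem.Dict String Int) (key : String) :
    ((pvBuildPos l (kp, lp)).1).get? key =
      (kp.get? key).or ((l.find? (fun e => e.2 == key)).map (·.1)) := by
  induction l generalizing kp lp with
  | nil => simp [pvBuildPos]
  | cons e rest ih =>
    rcases e with ⟨i, k⟩
    simp only [pvBuildPos, List.find?]
    rw [ih, pvSetdefault_eq]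
    by_cases he : (k == key) = true
    · have hk : k = key := by simpa using he
      subst hk
      simp only [he]
      by_cases hc : kp.contains k = true
      · rw [if_pos hc]
        rcases ho : kp.get? k with _ | v
        · rw [PySem.Dict.get?_eq_none_iff_contains kp k] at ho
          simp [ho] at hc
        · simp [Option.or]
      · rw [if_neg hc]
        have hn : kp.get? k = none :=
          (PySem.Dict.get?_eq_none_iff_contains kp k).mpr (by simpa using hc)
        rw [hn, PySem.Dict.get?_insert_self]
        simp [Option.or]
    · simp only [he]
      by_cases hc : kp.contains k = true
      · rw [if_pos hc]
      · rw [if_neg hc,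
          PySem.Dict.get?_insert_of_ne kp i (fun h : key = k => by simp [h] at he)]

theorem pvBuildPos_snd (l : List (Int × String)) (kp lp : PySem.Dict String Int) (s : String) :
    ((pvBuildPos l (kp, lp)).2).get? s =
      (lp.get? s).or ((l.find? (fun e => PySem.Str.lower e.2 == s)).map (·.1)) := by
  induction l generalizing kp lp with
  | nil => simp [pvBuildPos]
  | cons e rest ih =>
    rcases e with ⟨i, k⟩
    simp only [pvBuildPos, List.find?]
    rw [ih, pvSetdefault_eq]
    by_cases he : (PySem.Str.lower k == s) = true
    · have hk : PySem.Str.lower k = s := by simpa using he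
      simp only [he]
      by_cases hc : lp.contains (PySem.Str.lower k) = true
      · rw [if_pos hc]
        rcases ho : lp.get? s with _ | v
        · rw [PySem.Dict.get?_eq_none_iff_contains lp s] at ho
          rw [hk] at hc; simp [ho] at hc
        · simp [Option.or]
      · rw [if_neg hc]
        have hn : lp.get? s = none := by
          rw [PySem.Dict.get?_eq_none_iff_contains lp s, ← hk]
          simpa using hc
        rw [hn, ← hk, PySem.Dict.get?_insert_self]
        simp [Option.or]
    · simp only [he]
      by_cases hc : lp.contains (PySem.Str.lower k) = true
      · rw [if_pos hc]
      · rw [if_neg hc,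
          PySem.Dict.get?_insert_of_ne lp i
            (fun h : s = PySem.Str.lower k => by simp [h] at he)]

theorem pvScanB_eq_foldl (kp lp : PySem.Dict String Int)
    (E : List (Int × (String × String))) (best : Option ((Int × Int × Int) × String)) :
    pvScanB kp lp E best = (pvCandsD kp lp E).foldl pvStep best := by
  induction E generalizing best with
  | nil => rfl
  | cons e rest ih =>
    rcases e with ⟨pos, key, val⟩
    simp only [pvScanB, pvCandsD]
    by_cases ht : pvTruthy val = true
    · simp only [ht, Bool.not_true, Bool.false_eq_true, if_false, if_true]
      rcases kp.get? key with _ | i <;> rcases lp.get? (PySem.Str.lower key) with _ | j <;>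
        simp [ih, List.foldl]
    · have ht' : pvTruthy val = false := by simpa using ht
      simp [ht', ih]

theorem pvCandsD_eq (kp lp : PySem.Dict String Int) (keys : List String)
    (hk : ∀ key, kp.get? key = pvIdx keys 0 key)
    (hl : ∀ s, lp.get? s = pvIdxL keys 0 s)
    (E : List (Int × (String × String))) :
    pvCandsD kp lp E = pvCands keys 0 E := by
  induction E with
  | nil => rfl
  | cons e rest ih =>
    rcases e with ⟨pos, key, val⟩
    simp only [pvCandsD, pvCands, hk, hl, ih]

theorem pvLt3_irrefl (a : Int × Int × Int) : pvLt3 a a = false := by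
  rcases a with ⟨x, y, z⟩; simp [pvLt3]

theorem pvLt3_asymm {a b : Int × Int × Int} (h : pvLt3 a b = true) : pvLt3 b a = false := by
  rcases a with ⟨x, y, z⟩; rcases b with ⟨u, v, w⟩
  simp only [pvLt3] at h ⊢
  simp only [Bool.or_eq_true, Bool.and_eq_true, decide_eq_true_eq, beq_iff_eq] at h
  simp only [Bool.or_eq_false_iff, Bool.and_eq_false_iff, decide_eq_false_iff_not, beq_eq_false_iff_ne, ne_eq]
  omega

theorem pvLt3_of_fst {a b : Int × Int × Int} (h : a.1 < b.1) : pvLt3 a b = true := by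
  rcases a with ⟨x, y, z⟩; rcases b with ⟨u, v, w⟩; simp_all [pvLt3]

theorem pvLt3_of_snd {a b : Int × Int × Int} (h1 : a.1 = b.1) (h : a.2.1 < b.2.1) :
    pvLt3 a b = true := by
  rcases a with ⟨x, y, z⟩; rcases b with ⟨u, v, w⟩; simp_all [pvLt3]

theorem pvLt3_of_trd {a b : Int × Int × Int} (h1 : a.1 = b.1) (h2 : a.2.1 = b.2.1)
    (h : a.2.2 < b.2.2) : pvLt3 a b = true := by
  rcases a with ⟨x, y, z⟩; rcases b with ⟨u, v, w⟩; simp_all [pvLt3]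

-- the fold keeps the unique minimal candidate
theorem pvFoldl_step_min {c₀ : (Int × Int × Int) × String} :
    ∀ (cs : List ((Int × Int × Int) × String)) (b : Option ((Int × Int × Int) × String)),
    (∀ c ∈ cs, c = c₀ ∨ pvLt3 c₀.1 c.1 = true) →
    (b = some c₀ ∨ (c₀ ∈ cs ∧ (b = none ∨ ∃ b', b = some b' ∧ pvLt3 c₀.1 b'.1 = true))) →
    cs.foldl pvStep b = some c₀ := by
  intro cs
  induction cs with
  | nil =>
    intro b _ hb
    rcases hb with hb | ⟨hmem, _⟩
    · simpa using hb
    · simp at hmem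
  | cons c cs ih =>
    intro b hall hb
    have hc := hall c (List.mem_cons_self ..)
    have hall' : ∀ x ∈ cs, x = c₀ ∨ pvLt3 c₀.1 x.1 = true :=
      fun x hx => hall x (List.mem_cons_of_mem _ hx)
    simp only [List.foldl]
    rcases hb with hb | ⟨hmem, hbb⟩
    · subst hb
      apply ih _ hall'
      left
      rcases hc with hc | hc
      · subst hc; simp [pvStep, pvLt3_irrefl]
      · simp [pvStep, pvLt3_asymm hc]
    · rcases hc with hc | hc
      · subst hc
        apply ih _ hall'
        left
        rcases hbb with hbb | ⟨b', hbb, hlt⟩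
        · subst hbb; rfl
        · subst hbb; simp [pvStep, hlt]
      · have hmem' : c₀ ∈ cs := by
          rcases List.mem_cons.mp hmem with h | h
          · exfalso; rw [h] at hc; simp [pvLt3_irrefl] at hc
          · exact h
        apply ih _ hall'
        right
        refine ⟨hmem', ?_⟩
        right
        rcases hbb with hbb | ⟨b', hbb, hlt⟩
        · subst hbb; exact ⟨c, rfl, hc⟩
        · subst hbb
          simp only [pvStep]
          by_cases h2 : pvLt3 c.1 b'.1 = true
          · simp only [h2, if_true]; exact ⟨c, rfl, hc⟩
          · simp only [h2]; exact ⟨b', rfl, hlt⟩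

theorem pvMem_enumerate {α : Type} {p : Int} {x : α} :
    ∀ {L : List α} {m : Int}, (p, x) ∈ PySem.List.enumerate L m → x ∈ L ∧ m ≤ p := by
  intro L
  induction L with
  | nil => intro m h; simp [PySem.List.enumerate] at h
  | cons a t ih =>
    intro m h
    simp only [PySem.List.enumerate, List.mem_cons] at h
    rcases h with h | h
    · injection h with h1 h2
      subst h1; subst h2
      exact ⟨List.mem_cons_self .., le_refl _⟩
    · obtain ⟨hx, hm⟩ := ih h
      exact ⟨List.mem_cons_of_mem _ hx, by omega⟩

theorem pvEnumerate_inj {α : Type} {p : Int} {x y : α} :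
    ∀ {L : List α} {m : Int}, (p, x) ∈ PySem.List.enumerate L m →
      (p, y) ∈ PySem.List.enumerate L m → x = y := by
  intro L
  induction L with
  | nil => intro m h; simp [PySem.List.enumerate] at h
  | cons a t ih =>
    intro m h1 h2
    simp only [PySem.List.enumerate, List.mem_cons] at h1 h2
    rcases h1 with h1 | h1 <;> rcases h2 with h2 | h2
    · injection h1 with e1 f1; injection h2 with e2 f2; rw [f1, f2]
    · injection h1 with e1 f1
      have := (pvMem_enumerate h2).2
      omega
    · injection h2 with e2 f2
      have := (pvMem_enumerate h1).2
      omega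
    · exact ih h1 h2

theorem pvEnumerate_key_uniq {p p' : Int} {key : String} {v v' : String} :
    ∀ {L : List (String × String)} {m : Int}, (L.map Prod.fst).Nodup →
      (p, (key, v)) ∈ PySem.List.enumerate L m →
      (p', (key, v')) ∈ PySem.List.enumerate L m → p = p' ∧ v = v' := by
  intro L
  induction L with
  | nil => intro m _ h; simp [PySem.List.enumerate] at h
  | cons a t ih =>
    intro m hN h1 h2
    have hN2 : (a.1 :: t.map Prod.fst).Nodup := by simpa using hN
    have hka : a.1 ∉ t.map Prod.fst := (List.nodup_cons.mp hN2).1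
    have hN' : (t.map Prod.fst).Nodup := (List.nodup_cons.mp hN2).2
    simp only [PySem.List.enumerate, List.mem_cons] at h1 h2
    rcases h1 with h1 | h1 <;> rcases h2 with h2 | h2
    · injection h1 with e1 f1; injection h2 with e2 f2
      rw [← f2] at f1
      injection f1 with g1 g2
      exact ⟨by omega, g2⟩
    · exfalso
      injection h1 with e1 f1
      have hx := (pvMem_enumerate h2).1
      apply hka
      rw [← f1]
      exact (by simpa using List.mem_map_of_mem (f := Prod.fst) hx)
    · exfalso
      injection h2 with e2 f2
      have hx := (pvMem_enumerate h1).1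
      apply hka
      rw [← f2]
      exact (by simpa using List.mem_map_of_mem (f := Prod.fst) hx)
    · exact ih hN' h1 h2

theorem pvFind?_enumerate_some {α : Type} {q : α → Bool} {x : α} :
    ∀ {L : List α} (m : Int), L.find? q = some x →
      ∃ p, (PySem.List.enumerate L m).find? (fun e => q e.2) = some (p, x) ∧
        ∀ p' y, (p', y) ∈ PySem.List.enumerate L m → q y = true → p ≤ p' := by
  intro L
  induction L with
  | nil => intro m h; simp at h
  | cons a t ih =>
    intro m h
    simp only [PySem.List.enumerate]
    by_cases ha : q a = true
    · rw [List.find?_cons_of_pos ha] at h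
      injection h with h; subst h
      refine ⟨m, List.find?_cons_of_pos (by simpa using ha), ?_⟩
      intro p' y hy _
      rcases List.mem_cons.mp hy with h | h
      · injection h with e _; omega
      · have := (pvMem_enumerate h).2; omega
    · have ha' : q a = false := by simpa using ha
      rw [List.find?_cons_of_neg (by simp [ha'])] at h
      obtain ⟨p, hp, hmin⟩ := ih (m + 1) h
      refine ⟨p, ?_, ?_⟩
      · rw [List.find?_cons_of_neg (by simp [ha'])]
        exact hp
      · intro p' y hy hq
        rcases List.mem_cons.mp hy with hh | hh
        · injection hh with _ f; rw [f] at hq; simp [ha'] at hq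
        · exact hmin p' y hh hq

theorem pvMem_pvCands {c : (Int × Int × Int) × String} {keys : List String} {n : Int} :
    ∀ {E : List (Int × (String × String))},
    c ∈ pvCands keys n E ↔
      ∃ pos key val, (pos, (key, val)) ∈ E ∧ pvTruthy val = true ∧
        ((∃ i, pvIdx keys n key = some i ∧ c = ((i, 0, pos), val)) ∨
         (∃ j, pvIdxL keys n (PySem.Str.lower key) = some j ∧ c = ((j, 1, pos), val))) := by
  intro E
  induction E with
  | nil => simp [pvCands]
  | cons e rest ih =>
    rcases e with ⟨pos, key, val⟩
    simp only [pvCands, List.mem_append, ih]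
    constructor
    · rintro (hc | ⟨pos', key', val', hmem, ht, hor⟩)
      · by_cases ht : pvTruthy val = true
        · refine ⟨pos, key, val, List.mem_cons_self .., ht, ?_⟩
          rw [if_pos ht] at hc
          rcases List.mem_append.mp hc with h | h
          · left
            rcases hi : pvIdx keys n key with _ | i
            · simp [hi] at h
            · simp only [hi] at h
              exact ⟨i, rfl, by simpa using h⟩
          · right
            rcases hj : pvIdxL keys n (PySem.Str.lower key) with _ | j
            · simp [hj] at h
            · simp only [hj] at h
              exact ⟨j, rfl, by simpa using h⟩
        · rw [if_neg ht] at hc; simp at hc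
      · exact ⟨pos', key', val', List.mem_cons_of_mem _ hmem, ht, hor⟩
    · rintro ⟨pos', key', val', hmem, ht, hor⟩
      rcases List.mem_cons.mp hmem with hh | hh
      · injection hh with e1 f1
        injection f1 with f1 f2
        subst e1; subst f1; subst f2
        left
        rw [if_pos ht]
        apply List.mem_append.mpr
        rcases hor with ⟨i, hi, hc⟩ | ⟨j, hj, hc⟩
        · left; simp [hi, hc]
        · right; simp [hj, hc]
      · exact Or.inr ⟨pos', key', val', hh, ht, hor⟩

theorem pvIdx_cons (k : String) (rest : List String) (n : Int) (key : String) :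
    pvIdx (k :: rest) n key = if key = k then some n else pvIdx rest (n + 1) key := by
  simp only [pvIdx, PySem.List.enumerate, List.find?]
  by_cases he : key = k
  · subst he; simp
  · have : (k == key) = false := by simpa using fun h => he h.symm
    simp [this, he]

theorem pvIdxL_cons (k : String) (rest : List String) (n : Int) (s : String) :
    pvIdxL (k :: rest) n s =
      if PySem.Str.lower k = s then some n else pvIdxL rest (n + 1) s := by
  simp only [pvIdxL, PySem.List.enumerate, List.find?]
  by_cases he : PySem.Str.lower k = s
  · simp [he]
  · have : (PySem.Str.lower k == s) = false := by simpa using he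
    simp [this, he]

theorem pvIdx_ge {keys : List String} {key : String} {i : Int} :
    ∀ {n : Int}, pvIdx keys n key = some i → n ≤ i := by
  intro n h
  induction keys generalizing n with
  | nil => simp [pvIdx, PySem.List.enumerate] at h
  | cons k rest ih =>
    simp only [pvIdx, PySem.List.enumerate, List.find?] at h
    by_cases he : (k == key) = true
    · simp [he] at h; omega
    · simp only [he] at h
      have := ih (n := n + 1) (by simpa [pvIdx] using h)
      omega

theorem pvIdxL_ge {keys : List String} {s : String} {j : Int} :
    ∀ {n : Int}, pvIdxL keys n s = some j → n ≤ j := by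
  intro n h
  induction keys generalizing n with
  | nil => simp [pvIdxL, PySem.List.enumerate] at h
  | cons k rest ih =>
    simp only [pvIdxL, PySem.List.enumerate, List.find?] at h
    by_cases he : (PySem.Str.lower k == s) = true
    · simp [he] at h; omega
    · simp only [he] at h
      have := ih (n := n + 1) (by simpa [pvIdxL] using h)
      omega

theorem pvCands_nil_keys (n : Int) :
    ∀ (E : List (Int × (String × String))), pvCands [] n E = [] := by
  intro E
  induction E with
  | nil => rfl
  | cons e rest ih =>
    rcases e with ⟨pos, key, val⟩
    simp [pvCands, ih, pvIdx, pvIdxL, PySem.List.enumerate]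

-- find? only looks at members
theorem pvFind?_congr {α : Type} (l : List α) (p q : α → Bool) (h : ∀ x ∈ l, p x = q x) :
    l.find? p = l.find? q := by
  induction l with
  | nil => rfl
  | cons a t ih =>
    simp only [List.find?]
    rw [h a (List.mem_cons_self ..), ih (fun x hx => h x (List.mem_cons_of_mem _ hx))]

theorem pvCands_cons_shift (k : String) (rest : List String) (n : Int) :
    ∀ (E : List (Int × (String × String))),
      (∀ pos key val, (pos, (key, val)) ∈ E → pvTruthy val = true →
        key ≠ k ∧ PySem.Str.lower key ≠ PySem.Str.lower k) →
      pvCands (k :: rest) n E = pvCands rest (n + 1) E := by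
  intro E
  induction E with
  | nil => intro _; rfl
  | cons e tail ih =>
    rcases e with ⟨pos, key, val⟩
    intro h
    simp only [pvCands]
    rw [ih (fun pos' key' val' hm ht => h pos' key' val' (List.mem_cons_of_mem _ hm) ht)]
    congr 1
    by_cases ht : pvTruthy val = true
    · obtain ⟨h1, h2⟩ := h pos key val (List.mem_cons_self ..) ht
      simp only [ht, if_true]
      rw [pvIdx_cons, if_neg h1, pvIdxL_cons, if_neg (fun hh => h2 hh.symm)]
    · have ht' : pvTruthy val = false := by simpa using ht
      simp [ht']

set_option maxHeartbeats 1000000 in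
theorem pvMain (L : List (String × String)) (hN : (L.map Prod.fst).Nodup) :
    ∀ (keys : List String) (n m : Int),
      pvOut ((pvCands keys n (PySem.List.enumerate L m)).foldl pvStep none) = pvLoopA' L keys := by
  intro keys
  induction keys with
  | nil =>
    intro n m
    rw [pvCands_nil_keys]
    rfl
  | cons k rest ih =>
    intro n m
    by_cases hEx : (match L.find? (fun p => p.1 == k) with
        | some p => pvTruthy p.2 | none => false) = true
    · -- exact truthy match: the minimum candidate is ((n, 0, pos₀), p.2)
      rcases hf : L.find? (fun p => p.1 == k) with _ | p
      · rw [hf] at hEx; simp at hEx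
      rw [hf] at hEx
      rcases p with ⟨p1, p2⟩
      have hp1 : p1 = k := by simpa using List.find?_some hf
      obtain ⟨pos₀, hfe, _⟩ :=
        pvFind?_enumerate_some m hf
      have hmem₀ : (pos₀, (p1, p2)) ∈ PySem.List.enumerate L m :=
        List.mem_of_find?_eq_some hfe
      have hc₀ : ((n, (0:Int), pos₀), p2) ∈ pvCands (k :: rest) n (PySem.List.enumerate L m) :=
        pvMem_pvCands.mpr ⟨pos₀, p1, p2, hmem₀, hEx,
          Or.inl ⟨n, by rw [pvIdx_cons, if_pos hp1], rfl⟩⟩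
      have hall : ∀ c ∈ pvCands (k :: rest) n (PySem.List.enumerate L m),
          c = ((n, (0:Int), pos₀), p2) ∨ pvLt3 ((n, (0:Int), pos₀), p2).1 c.1 = true := by
        intro c hc
        obtain ⟨pos, key, val, hmem, htv, hor⟩ := pvMem_pvCands.mp hc
        rcases hor with ⟨i, hi, rfl⟩ | ⟨j, hj, rfl⟩
        · rw [pvIdx_cons] at hi
          by_cases hk : key = k
          · rw [if_pos hk] at hi
            injection hi with hi
            have hmem₀' : (pos₀, (key, p2)) ∈ PySem.List.enumerate L m := by
              rw [hk, ← hp1]; exact hmem₀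
            obtain ⟨hpp, hvv⟩ := pvEnumerate_key_uniq hN hmem hmem₀'
            left; rw [hpp, hvv, ← hi]
          · rw [if_neg hk] at hi
            have := pvIdx_ge hi
            exact Or.inr (pvLt3_of_fst (by simpa using by omega))
        · have hjge : n ≤ j := by
            rw [pvIdxL_cons] at hj
            by_cases hl : PySem.Str.lower k = PySem.Str.lower key
            · rw [if_pos hl] at hj; injection hj with hj; omega
            · rw [if_neg hl] at hj; exact le_of_lt (by have := pvIdxL_ge hj; omega)
          right
          rcases lt_or_eq_of_le hjge with h | h
          · exact pvLt3_of_fst (by simpa using h)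
          · exact pvLt3_of_snd (by simpa using h) (by norm_num)
      rw [pvFoldl_step_min _ none hall (Or.inr ⟨hc₀, Or.inl rfl⟩)]
      simp [pvLoopA', hf, hEx, pvOut]
    · have hEx' : (match L.find? (fun p => p.1 == k) with
          | some p => pvTruthy p.2 | none => false) = false := by simpa using hEx
      -- no truthy entry of L has key exactly k
      have hNoEx : ∀ pos key val, (pos, (key, val)) ∈ PySem.List.enumerate L m →
          pvTruthy val = true → key ≠ k := by
        intro pos key val hmem htv heq
        rcases hf : L.find? (fun p => p.1 == k) with _ | p
        · rw [List.find?_eq_none] at hf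
          exact hf (key, val) (pvMem_enumerate hmem).1 (by simp [heq])
        · rw [hf] at hEx'
          rcases p with ⟨p1, p2⟩
          have hp1 : p1 = k := by simpa using List.find?_some hf
          obtain ⟨posp, hfe, _⟩ :=
            pvFind?_enumerate_some m hf
          have hmem' : (posp, (key, p2)) ∈ PySem.List.enumerate L m := by
            rw [heq, ← hp1]; exact List.mem_of_find?_eq_some hfe
          obtain ⟨_, hvv⟩ := pvEnumerate_key_uniq hN hmem hmem'
          rw [← hvv] at hEx'
          simp [htv] at hEx'
      rcases hci : L.find? (fun p => (PySem.Str.lower p.1 == PySem.Str.lower k) && pvTruthy p.2)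
          with _ | q
      · -- no candidate for k at all: drop k and recurse
        have hKey : ∀ pos key val, (pos, (key, val)) ∈ PySem.List.enumerate L m →
            pvTruthy val = true → key ≠ k ∧ PySem.Str.lower key ≠ PySem.Str.lower k := by
          intro pos key val hmem htv
          refine ⟨hNoEx pos key val hmem htv, ?_⟩
          intro heq
          rw [List.find?_eq_none] at hci
          exact hci (key, val) (pvMem_enumerate hmem).1 (by simp [heq, htv])
        rw [pvCands_cons_shift _ _ _ _ hKey, ih (n + 1) m]
        simp [pvLoopA', hEx', hci]
      · -- first case-insensitive truthy match q at row position pos₀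
        rcases q with ⟨q1, q2⟩
        have hq12 : PySem.Str.lower q1 = PySem.Str.lower k ∧ pvTruthy q2 = true := by
          have := List.find?_some hci
          simpa using this
        obtain ⟨pos₀, hfe, hmin⟩ :=
          pvFind?_enumerate_some m hci
        have hmem₀ : (pos₀, (q1, q2)) ∈ PySem.List.enumerate L m :=
          List.mem_of_find?_eq_some hfe
        have hc₀ : ((n, (1:Int), pos₀), q2) ∈ pvCands (k :: rest) n (PySem.List.enumerate L m) :=
          pvMem_pvCands.mpr ⟨pos₀, q1, q2, hmem₀, hq12.2,
            Or.inr ⟨n, by rw [pvIdxL_cons, if_pos hq12.1.symm], rfl⟩⟩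
        have hall : ∀ c ∈ pvCands (k :: rest) n (PySem.List.enumerate L m),
            c = ((n, (1:Int), pos₀), q2) ∨ pvLt3 ((n, (1:Int), pos₀), q2).1 c.1 = true := by
          intro c hc
          obtain ⟨pos, key, val, hmem, htv, hor⟩ := pvMem_pvCands.mp hc
          rcases hor with ⟨i, hi, rfl⟩ | ⟨j, hj, rfl⟩
          · rw [pvIdx_cons] at hi
            rw [if_neg (hNoEx pos key val hmem htv)] at hi
            have := pvIdx_ge hi
            exact Or.inr (pvLt3_of_fst (by simpa using by omega))
          · rw [pvIdxL_cons] at hj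
            by_cases hl : PySem.Str.lower k = PySem.Str.lower key
            · rw [if_pos hl] at hj
              injection hj with hj
              have hple : pos₀ ≤ pos :=
                hmin pos (key, val) hmem (by simp [hl.symm, htv])
              by_cases hpe : pos = pos₀
              · left
                rw [hpe] at hmem
                have := pvEnumerate_inj hmem hmem₀
                injection this with e1 e2
                rw [hpe, e2, ← hj]
              · right
                exact pvLt3_of_trd (by simpa using hj) rfl (by simp; omega)
            · rw [if_neg hl] at hj
              have := pvIdxL_ge hj
              exact Or.inr (pvLt3_of_fst (by simpa using by omega))
        rw [pvFoldl_step_min _ none hall (Or.inr ⟨hc₀, Or.inl rfl⟩)]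
        simp [pvLoopA', hEx', hci, pvOut]

theorem pvGet?_eq_find? (d : PySem.Dict String String) (hN : d.keys.Nodup) (k : String) :
    d.get? k = (d.items.find? (fun p => p.1 == k)).map Prod.snd := by
  rcases hf : d.items.find? (fun p => p.1 == k) with _ | p
  · rw [hf]
    simp only [Option.map_none]
    apply (PySem.Dict.get?_eq_none_iff_not_mem_keys d k).mpr
    intro hk
    rw [List.find?_eq_none] at hf
    simp only [PySem.Dict.keys, List.mem_map] at hk
    obtain ⟨p, hp, he⟩ := hk
    exact hf p hp (by simp [he])
  · rw [hf]
    rcases p with ⟨p1, p2⟩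
    have hp1 : p1 = k := by simpa using List.find?_some hf
    rw [PySem.Dict.get?_of_mem_items d (show (k, p2) ∈ d.items by
      rw [← hp1]; exact List.mem_of_find?_eq_some hf) hN]
    rfl

theorem pvLoopA_eq (d : PySem.Dict String String) (hN : d.keys.Nodup) (keys : List String) :
    pvLoopA d keys = pvLoopA' d.items keys := by
  induction keys with
  | nil => rfl
  | cons k rest ih =>
    simp only [pvLoopA, pvLoopA']
    have h2 : d.getD k "" = ((d.items.find? (fun p => p.1 == k)).map Prod.snd).getD "" := by
      rw [PySem.Dict.getD_eq_get?_getD, pvGet?_eq_find? d hN]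
    have h1 : (d.contains k && pvTruthy (d.getD k "")) =
        (match d.items.find? (fun p => p.1 == k) with
         | some p => pvTruthy p.2 | none => false) := by
      rw [PySem.Dict.contains_eq_isSome_get?, PySem.Dict.getD_eq_get?_getD,
        pvGet?_eq_find? d hN]
      generalize d.items.find? (fun p => p.1 == k) = o
      rcases o with _ | p <;> simp
    have hcongr : ∀ p ∈ d.items,
        ((PySem.Str.lower p.1 == PySem.Str.lower k) && pvTruthy (d.getD p.1 "")) =
        ((PySem.Str.lower p.1 == PySem.Str.lower k) && pvTruthy p.2) := by
      intro p hp
      rcases p with ⟨a, b⟩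
      rw [PySem.Dict.getD_of_mem_items d hp hN]
    have h3 : d.keys.find?
          (fun key => (PySem.Str.lower key == PySem.Str.lower k) && pvTruthy (d.getD key "")) =
        (d.items.find?
          (fun p => (PySem.Str.lower p.1 == PySem.Str.lower k) && pvTruthy p.2)).map Prod.fst := by
      show (d.items.map Prod.fst).find? _ = _
      rw [List.find?_map]
      exact congrArg (Option.map Prod.fst) (pvFind?_congr d.items _ _ hcongr)
    rw [h1, h2, h3, ih]
    rcases hci : d.items.find?
        (fun p => (PySem.Str.lower p.1 == PySem.Str.lower k) && pvTruthy p.2) with _ | q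
    · rw [hci]
      rfl
    · rw [hci]
      have hg : d.getD q.1 "" = q.2 :=
        PySem.Dict.getD_of_mem_items d
          (show (q.1, q.2) ∈ d.items from by
            rcases q with ⟨a, b⟩; exact List.mem_of_find?_eq_some hci) hN ""
      simp [hg]

theorem get_first_value_py_spec : Claim_equal_get_first_value_py := by
  intro row keys _
  unfold Spec_get_first_value_py get_first_value_py get_first_value_py_alt
  have hN : (PySem.Dict.ofList row).keys.Nodup := PySem.Dict.nodup_keys_ofList row
  have hNi : ((PySem.Dict.ofList row).items.map Prod.fst).Nodup := hN
  have hk : ∀ key,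
      (pvBuildPos (PySem.List.enumerate keys) (PySem.Dict.empty, PySem.Dict.empty)).1.get? key =
        pvIdx keys 0 key := by
    intro key
    rw [pvBuildPos_fst]
    simp [pvIdx, Option.or]
  have hl : ∀ s,
      (pvBuildPos (PySem.List.enumerate keys) (PySem.Dict.empty, PySem.Dict.empty)).2.get? s =
        pvIdxL keys 0 s := by
    intro s
    rw [pvBuildPos_snd]
    simp [pvIdxL, Option.or]
  rw [pvLoopA_eq _ hN]
  rw [show (match pvScanB
        (pvBuildPos (PySem.List.enumerate keys) (PySem.Dict.empty, PySem.Dict.empty)).1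
        (pvBuildPos (PySem.List.enumerate keys) (PySem.Dict.empty, PySem.Dict.empty)).2
        (PySem.List.enumerate (PySem.Dict.ofList row).items) none with
      | some c => PySem.Str.strip c.2
      | none => "") = pvOut (pvScanB
        (pvBuildPos (PySem.List.enumerate keys) (PySem.Dict.empty, PySem.Dict.empty)).1
        (pvBuildPos (PySem.List.enumerate keys) (PySem.Dict.empty, PySem.Dict.empty)).2
        (PySem.List.enumerate (PySem.Dict.ofList row).items) none) from by
    rcases pvScanB _ _ _ none with _ | c <;> rfl]
  rw [pvScanB_eq_foldl, pvCandsD_eq _ _ keys hk hl]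
  exact (pvMain (PySem.Dict.ofList row).items hNi keys 0 0).symm
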